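-- pv_equiv track=rewrite | github.com/voukatas/Commander | admin.py | complete_show
-- ===== SOURCE A (Python) =====
-- def complete_show(text, line, begidx, endidx):
--
--     options = ["agent", "task", "result"]
--     options_args = ["your_uuid", "all", "type="]
--     options_os = ["Linux", "Windows"]
--
--     if "show task" in line:
--         if "show task" in line and (begidx==15):
--             return [i for i in options_os if i.startswith(text)]
--         elif "show task" in line:
--             return [i for i in options_args if i.startswith(text)]
--
--     elif "show result" in line:
--         if "show result" in line and (begidx==12):
--             return [i for i in options_args if i.startswith(text)]
--         elif "show result" in line and (begidx==17):
--             return [i for i in options_os if i.startswith(text)]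
--
--     elif "show agent" in line:
--         if "show agent" in line and (begidx==11):
--             return [i for i in options_args if i.startswith(text)]
--         elif "show agent" in line and (begidx==16):
--             return [i for i in options_os if i.startswith(text)]
--     else:
--         return [i for i in options if i.startswith(text)]
-- ===== SOURCE B (Python) =====
-- def complete_show(text, line, begidx, endidx):
--     options_args = ["your_uuid", "all", "type="]
--     options_os = ["Linux", "Windows"]
--     rules = [
--         ("show task", {15: options_os}, options_args),
--         ("show result", {12: options_args, 17: options_os}, None),
--         ("show agent", {11: options_args, 16: options_os}, None),
--     ]
--     for cmd, by_begidx, default in rules: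
--         if cmd in line:
--             opts = by_begidx.get(begidx, default)
--             return None if opts is None else [i for i in opts if i.startswith(text)]
--     return [i for i in ["agent", "task", "result"] if i.startswith(text)]
-- ===== Notes on version B (the rewrite author's own statement) =====
-- stated objective: simpler
-- what changed: Replaces the nested if/elif tree with a data-driven dispatch table (command -> begidx -> option list, plus a per-command default) scanned in one loop with a single filter expression.
import Mathlib
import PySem

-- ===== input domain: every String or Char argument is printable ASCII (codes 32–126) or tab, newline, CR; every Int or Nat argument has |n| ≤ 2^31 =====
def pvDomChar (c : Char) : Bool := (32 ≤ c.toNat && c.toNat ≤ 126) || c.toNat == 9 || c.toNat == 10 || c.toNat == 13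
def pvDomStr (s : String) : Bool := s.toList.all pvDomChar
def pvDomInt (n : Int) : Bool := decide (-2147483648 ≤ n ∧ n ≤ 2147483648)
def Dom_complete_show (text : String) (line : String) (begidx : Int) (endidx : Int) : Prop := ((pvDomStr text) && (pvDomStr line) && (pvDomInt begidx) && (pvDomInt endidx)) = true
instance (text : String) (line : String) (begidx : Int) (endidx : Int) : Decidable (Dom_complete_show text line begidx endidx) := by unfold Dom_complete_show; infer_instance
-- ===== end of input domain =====

-- B replaces A's nested if/elif tree with a dispatch table (command -> begidx -> options, plus a per-command default) scanned in one loop: simpler, same cost.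


-- ===== PORT A =====
def complete_show (text : String) (line : String) (begidx : Int) (endidx : Int) : Option (List String) :=
  let options : List String := ["agent", "task", "result"]
  let options_args : List String := ["your_uuid", "all", "type="]
  let options_os : List String := ["Linux", "Windows"]
  if PySem.Str.isIn "show task" line then
    if PySem.Str.isIn "show task" line && begidx == 15 then
      some (options_os.filter (fun i => PySem.Str.startswith i text))
    else if PySem.Str.isIn "show task" line then
      some (options_args.filter (fun i => PySem.Str.startswith i text))
    else none
  else if PySem.Str.isIn "show result" line then
    if PySem.Str.isIn "show result" line && begidx == 12 then
      some (options_args.filter (fun i => PySem.Str.startswith i text))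
    else if PySem.Str.isIn "show result" line && begidx == 17 then
      some (options_os.filter (fun i => PySem.Str.startswith i text))
    else none
  else if PySem.Str.isIn "show agent" line then
    if PySem.Str.isIn "show agent" line && begidx == 11 then
      some (options_args.filter (fun i => PySem.Str.startswith i text))
    else if PySem.Str.isIn "show agent" line && begidx == 16 then
      some (options_os.filter (fun i => PySem.Str.startswith i text))
    else none
  else
    some (options.filter (fun i => PySem.Str.startswith i text))

-- ===== PORT B =====
-- the dispatch table of Source B: (command, begidx -> options, default)
def csRules : List (String × PySem.Dict Int (List String) × Option (List String)) :=
  [("show task", PySem.Dict.ofList [(15, ["Linux", "Windows"])], some ["your_uuid", "all", "type="]),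
   ("show result", PySem.Dict.ofList [(12, ["your_uuid", "all", "type="]), (17, ["Linux", "Windows"])], none),
   ("show agent", PySem.Dict.ofList [(11, ["your_uuid", "all", "type="]), (16, ["Linux", "Windows"])], none)]

-- the for-loop of Source B over the rules
def csGo (text : String) (line : String) (begidx : Int) :
    List (String × PySem.Dict Int (List String) × Option (List String)) → Option (List String)
  | [] => some ((["agent", "task", "result"] : List String).filter (fun i => PySem.Str.startswith i text))
  | (cmd, by_begidx, dflt) :: rest =>
    if PySem.Str.isIn cmd line then
      let opts : Option (List String) :=
        match by_begidx.get? begidx with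
        | some v => some v
        | none => dflt
      match opts with
      | none => none
      | some o => some (o.filter (fun i => PySem.Str.startswith i text))
    else csGo text line begidx rest

def complete_show_alt (text : String) (line : String) (begidx : Int) (endidx : Int) : Option (List String) :=
  csGo text line begidx csRules

-- ===== PRECONDITION & SPEC =====
def Spec_complete_show (text : String) (line : String) (begidx : Int) (endidx : Int) (out : Option (List String)) : Prop := out = complete_show_alt text line begidx endidx
instance (text : String) (line : String) (begidx : Int) (endidx : Int) (out : Option (List String)) : Decidable (Spec_complete_show text line begidx endidx out) := by unfold Spec_complete_show; infer_instance

-- ===== CLAIM (what is proved, stated in full; the proofs are below) =====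
def Claim_equal_complete_show : Prop := ∀ (text : String) (line : String) (begidx : Int) (endidx : Int), Dom_complete_show text line begidx endidx → Spec_complete_show text line begidx endidx (complete_show text line begidx endidx)

-- ===== LEMMAS AND PROOFS =====

lemma csGet?_one (k1 : Int) (v1 : List String) (b : Int) :
    (PySem.Dict.ofList [(k1, v1)]).get? b = if b = k1 then some v1 else none := by
  by_cases h : b = k1 <;>
    simp [PySem.Dict.get?, PySem.Dict.ofList, PySem.Dict.update, PySem.Dict.insert,
      PySem.Dict.contains, PySem.Dict.items, PySem.Dict.empty, List.find?, h] <;> omega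

lemma csGet?_two (k1 k2 : Int) (v1 v2 : List String) (b : Int) (hk : k1 ≠ k2) :
    (PySem.Dict.ofList [(k1, v1), (k2, v2)]).get? b =
      if b = k1 then some v1 else if b = k2 then some v2 else none := by
  by_cases h1 : b = k1
  · subst h1
    simp [PySem.Dict.get?, PySem.Dict.ofList, PySem.Dict.update, PySem.Dict.insert,
      PySem.Dict.contains, PySem.Dict.items, PySem.Dict.empty, List.find?, hk, Ne.symm hk]
  · by_cases h2 : b = k2
    · subst h2
      simp [PySem.Dict.get?, PySem.Dict.ofList, PySem.Dict.update, PySem.Dict.insert,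
        PySem.Dict.contains, PySem.Dict.items, PySem.Dict.empty, List.find?,
        Ne.symm h1, h1, hk, Ne.symm hk]
    · simp [PySem.Dict.get?, PySem.Dict.ofList, PySem.Dict.update, PySem.Dict.insert,
        PySem.Dict.contains, PySem.Dict.items, PySem.Dict.empty, List.find?,
        Ne.symm h1, h1, Ne.symm h2, h2, hk, beq_eq_decide]

-- ===== VERDICT (by name: the statement is the Claim_ definition above) =====
theorem complete_show_spec : Claim_equal_complete_show := by
  intro text line begidx endidx _
  unfold Spec_complete_show complete_show complete_show_alt
  simp only [csRules, csGo, csGet?_one, csGet?_two]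
  split_ifs <;> simp_all [csGo, csGet?_one, csGet?_two]
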